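-- pv_equiv track=rewrite | github.com/Wonjin-Lee/algorithm-with-python-study | Greedy/bowling_ball.py | solution
-- ===== SOURCE A (Python) =====
-- def solution(bowling_balls):
--
--     count = 0
--
--     for i in range(len(bowling_balls) - 1):
--         for j in range(i + 1, len(bowling_balls)):
--             first_ball = bowling_balls[i]
--             second_ball = bowling_balls[j]
--
--             if first_ball != second_ball:
--                 count += 1
--
--     return count
-- ===== SOURCE B (Python) =====
-- def solution(bowling_balls):
--     count = 0
--     seen = {}
--     for i, ball in enumerate(bowling_balls):
--         count += i - seen.get(ball, 0)
--         seen[ball] = seen.get(ball, 0) + 1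
--     return count
-- ===== Notes on version B (the rewrite author's own statement) =====
-- stated objective: faster
-- what changed: Replaced the quadratic double loop over index pairs by a single pass that keeps a frequency dict of the weights seen so far and adds, for each ball, the number of earlier balls of a different weight.
import Mathlib
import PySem

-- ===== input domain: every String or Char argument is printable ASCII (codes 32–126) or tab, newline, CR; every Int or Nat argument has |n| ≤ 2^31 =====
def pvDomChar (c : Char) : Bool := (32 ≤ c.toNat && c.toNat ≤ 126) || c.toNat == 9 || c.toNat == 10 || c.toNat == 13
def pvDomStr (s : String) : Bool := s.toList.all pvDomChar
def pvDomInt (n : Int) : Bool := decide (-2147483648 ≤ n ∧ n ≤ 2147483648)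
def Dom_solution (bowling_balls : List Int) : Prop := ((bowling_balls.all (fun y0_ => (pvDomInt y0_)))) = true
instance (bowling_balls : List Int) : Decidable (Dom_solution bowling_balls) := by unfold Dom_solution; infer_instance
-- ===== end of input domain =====

-- B replaces A's quadratic double loop by one pass with a seen-so-far frequency dict (objective: faster, asymptotic).

-- ===== PORT A =====
-- indices i, j always lie in range, so bowling_balls[i] / [j] is exact as pyGetD with any default
def solution (bowling_balls : List Int) : Int :=
  (PySem.List.pyRange 0 ((bowling_balls.length : Int) - 1)).foldl
    (fun count i =>
      (PySem.List.pyRange (i + 1) (bowling_balls.length : Int)).foldl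
        (fun count j =>
          let first_ball := PySem.List.pyGetD bowling_balls i 0
          let second_ball := PySem.List.pyGetD bowling_balls j 0
          if first_ball ≠ second_ball then count + 1 else count)
        count)
    0

-- ===== PORT B =====
def bStep (s : Int × PySem.Dict Int Int) (p : Int × Int) : Int × PySem.Dict Int Int :=
  (s.1 + (p.1 - s.2.getD p.2 0), s.2.insert p.2 (s.2.getD p.2 0 + 1))

def solution_alt (bowling_balls : List Int) : Int :=
  ((PySem.List.enumerate bowling_balls 0).foldl bStep (0, PySem.Dict.empty)).1

-- ===== PRECONDITION & SPEC =====
def Spec_solution (bowling_balls : List Int) (out : Int) : Prop := out = solution_alt bowling_balls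
instance (bowling_balls : List Int) (out : Int) : Decidable (Spec_solution bowling_balls out) := by unfold Spec_solution; infer_instance

-- ===== CLAIM (what is proved, stated in full; the proofs are below) =====
def Claim_equal_solution : Prop := ∀ (bowling_balls : List Int), Dom_solution bowling_balls → Spec_solution bowling_balls (solution bowling_balls)

-- ===== LEMMAS AND PROOFS =====

/-- Number of ordered pairs i < j with different values, by structural recursion on the list. -/
def pairsA : List Int → Int
  | [] => 0
  | x :: xs => ((xs.countP (fun y => decide (y ≠ x)) : Nat) : Int) + pairsA xs

/-- Number of elements of `pre` different from `x`. -/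
def cnt (pre : List Int) (x : Int) : Int := ((pre.countP (fun y => decide (y ≠ x)) : Nat) : Int)

/-- Pairs contributed by B's loop over `xs` when `pre` has already been seen. -/
def fMix : List Int → List Int → Int
  | _, [] => 0
  | pre, x :: xs => cnt pre x + fMix (pre ++ [x]) xs

lemma len_split (pre : List Int) (x : Int) :
    pre.length = pre.count x + pre.countP (fun y => decide (y ≠ x)) := by
  induction pre with
  | nil => simp
  | cons y ys ih =>
    by_cases h : y = x <;> simp [h, ih] <;> omega

lemma countP_pyRange (bs : List Int) (q : Int → Bool) :
    ∀ (m a : Nat), a + m = bs.length →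
      (PySem.List.pyRange (a : Int) (bs.length : Int)).countP
          (fun j => q (PySem.List.pyGetD bs j 0))
        = (bs.drop a).countP q := by
  intro m
  induction m with
  | zero =>
    intro a ha
    rw [PySem.List.pyRange_one_eq_nil (by omega)]
    have : bs.drop a = [] := List.drop_eq_nil_of_le (by omega)
    simp [this]
  | succ k ih =>
    intro a ha
    have hlt : a < bs.length := by omega
    rw [PySem.List.pyRange_one_cons (by exact_mod_cast hlt)]
    have h1 : ((a : Int) + 1) = ((a + 1 : Nat) : Int) := by push_cast; ring
    rw [List.countP_cons, h1, ih (a + 1) (by omega)]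
    have hdrop : bs.drop a = bs[a] :: bs.drop (a + 1) := List.drop_eq_getElem_cons hlt
    have hget : PySem.List.pyGetD bs (a : Int) 0 = bs[a] := by
      rw [PySem.List.pyGetD_natCast]; exact List.getD_eq_getElem bs 0 hlt
    rw [hdrop, List.countP_cons, hget]

lemma inner_eq (bs : List Int) (k : Nat) (hk : k < bs.length) (c : Int) :
    (PySem.List.pyRange ((k : Int) + 1) (bs.length : Int)).foldl
        (fun count j =>
          if PySem.List.pyGetD bs (k : Int) 0 ≠ PySem.List.pyGetD bs j 0 then count + 1
          else count) c
      = c + (((bs.drop (k + 1)).countP (fun y => decide (y ≠ bs.getD k 0)) : Nat) : Int) := by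
  rw [PySem.List.foldl_ite_add_one
      (p := fun j => PySem.List.pyGetD bs (k : Int) 0 ≠ PySem.List.pyGetD bs j 0)]
  have hg : PySem.List.pyGetD bs (k : Int) 0 = bs.getD k 0 := PySem.List.pyGetD_natCast bs k 0
  simp only [hg]
  have h1 : ((k : Int) + 1) = ((k + 1 : Nat) : Int) := by push_cast; ring
  rw [h1, countP_pyRange bs (fun y => decide (bs.getD k 0 ≠ y)) (bs.length - (k + 1)) (k + 1)
      (by omega)]
  congr 1
  norm_cast
  apply List.countP_congr
  intro y _
  simp [ne_comm]

lemma sum_range_pairsA : ∀ bs : List Int,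
    ((List.range (bs.length - 1)).map
        (fun k => (((bs.drop (k + 1)).countP (fun y => decide (y ≠ bs.getD k 0)) : Nat) : Int))).sum
      = pairsA bs := by
  intro bs
  induction bs with
  | nil => simp [pairsA]
  | cons x xs ih =>
    cases hx : xs.length with
    | zero =>
      have hxs : xs = [] := List.eq_nil_of_length_eq_zero hx
      subst hxs
      simp [pairsA]
    | succ m =>
      have hlen : (x :: xs).length - 1 = m + 1 := by simp [hx]
      rw [hlen, List.range_succ_eq_map]
      simp only [List.map_cons, List.map_map, List.sum_cons]
      have hmap :
          (List.range m).map
              ((fun k => ((((x :: xs).drop (k + 1)).countP (fun y => decide (y ≠ (x :: xs).getD k 0)) : Nat) : Int)) ∘ Nat.succ)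
            = (List.range m).map
              (fun k => (((xs.drop (k + 1)).countP (fun y => decide (y ≠ xs.getD k 0)) : Nat) : Int)) := by
        apply List.map_congr_left
        intro k _
        simp only [Function.comp_apply, Nat.succ_eq_add_one, List.drop_succ_cons,
          List.getD_cons_succ]
      rw [hmap]
      have hm : m = xs.length - 1 := by omega
      rw [hm, ih]
      simp [pairsA, List.getD]

lemma A_eq (bs : List Int) : solution bs = pairsA bs := by
  unfold solution
  by_cases h0 : bs = []
  · subst h0
    rw [PySem.List.pyRange_one_eq_nil (by norm_num)]
    simp [pairsA]
  · obtain ⟨m, hn⟩ : ∃ m, bs.length = m + 1 := by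
      rcases Nat.exists_eq_succ_of_ne_zero (fun h => h0 (List.eq_nil_of_length_eq_zero h)) with ⟨m, hm⟩
      exact ⟨m, hm⟩
    have h1 : ((bs.length : Int) - 1) = (m : Int) := by rw [hn]; push_cast; ring
    rw [h1, PySem.List.pyRange_zero_natCast, List.foldl_map]
    have hcong : ∀ (c : Int), ∀ k ∈ List.range m,
        (PySem.List.pyRange ((k : Int) + 1) (bs.length : Int)).foldl
            (fun count j =>
              let first_ball := PySem.List.pyGetD bs (k : Int) 0
              let second_ball := PySem.List.pyGetD bs j 0
              if first_ball ≠ second_ball then count + 1 else count) c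
          = c + (((bs.drop (k + 1)).countP (fun y => decide (y ≠ bs.getD k 0)) : Nat) : Int) := by
      intro c k hk
      exact inner_eq bs k (by rw [hn]; exact Nat.lt_succ_of_lt (List.mem_range.mp hk)) c
    rw [PySem.List.foldl_congr_mem _ _
        (fun c k => c + (((bs.drop (k + 1)).countP (fun y => decide (y ≠ bs.getD k 0)) : Nat) : Int))
        _ hcong]
    rw [PySem.List.foldl_add]
    have hm : m = bs.length - 1 := by omega
    rw [hm, sum_range_pairsA bs]
    ring

lemma fMix_perm (xs : List Int) : ∀ (pre pre' : List Int), pre.Perm pre' →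
    fMix pre xs = fMix pre' xs := by
  induction xs with
  | nil => intro pre pre' _; simp [fMix]
  | cons x xs ih =>
    intro pre pre' h
    simp only [fMix, cnt, h.countP_eq]
    rw [ih (pre ++ [x]) (pre' ++ [x]) (h.append_right [x])]

lemma fMix_shift (xs : List Int) : ∀ (pre : List Int) (x : Int),
    fMix (pre ++ [x]) xs = fMix pre xs + ((xs.countP (fun y => decide (y ≠ x)) : Nat) : Int) := by
  induction xs with
  | nil => intro pre x; simp [fMix]
  | cons y ys ih =>
    intro pre x
    simp only [fMix]
    have hperm : ((pre ++ [x]) ++ [y]).Perm ((pre ++ [y]) ++ [x]) := by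
      simp only [List.append_assoc]
      exact List.Perm.append_left pre (List.Perm.swap y x [])
    rw [fMix_perm ys _ _ hperm, ih (pre ++ [y]) x]
    have hcnt : cnt (pre ++ [x]) y = cnt pre y + (if x = y then 0 else 1) := by
      simp only [cnt, List.countP_append, List.countP_cons, List.countP_nil]
      by_cases h : x = y <;> simp [h]
    rw [hcnt, List.countP_cons]
    by_cases h : x = y
    · subst h; simp; omega
    · have h' : ¬ y = x := fun hh => h hh.symm
      simp [h']
      omega

lemma fMix_nil_eq_pairsA : ∀ xs : List Int, fMix [] xs = pairsA xs := by
  intro xs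
  induction xs with
  | nil => simp [fMix, pairsA]
  | cons x xs ih =>
    show cnt [] x + fMix ([] ++ [x]) xs = pairsA (x :: xs)
    rw [fMix_shift xs [] x, ih]
    simp [cnt, pairsA]
    ring

lemma B_loop : ∀ (xs pre : List Int) (c : Int) (d : PySem.Dict Int Int),
    (∀ v, d.getD v 0 = (pre.count v : Int)) →
    ((PySem.List.enumerate xs (pre.length : Int)).foldl bStep (c, d)).1 = c + fMix pre xs := by
  intro xs
  induction xs with
  | nil => intro pre c d _; simp [fMix, PySem.List.enumerate]
  | cons x xs ih =>
    intro pre c d hd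
    rw [PySem.List.enumerate_cons]
    simp only [List.foldl_cons, bStep]
    have hlen : ((pre.length : Int) + 1) = (((pre ++ [x]).length : Nat) : Int) := by
      simp
    rw [hlen, ih (pre ++ [x]) _ _ ?_]
    · have hc : c + ((pre.length : Int) - d.getD x 0) = c + cnt pre x := by
        rw [hd x]
        have := len_split pre x
        simp only [cnt]
        omega
      rw [hc]
      simp only [fMix]
      ring
    · intro v
      rw [PySem.Dict.getD_insert]
      by_cases hv : v = x
      · subst hv
        rw [if_pos rfl, hd v]
        simp [List.count_append]
      · rw [if_neg hv, hd v]
        simp [List.count_append, Ne.symm hv]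

lemma B_eq (bs : List Int) : solution_alt bs = pairsA bs := by
  unfold solution_alt
  have hd0 : ∀ v : Int,
      (PySem.Dict.empty : PySem.Dict Int Int).getD v 0 = ((([] : List Int).count v : Nat) : Int) := by
    intro v
    simp [PySem.Dict.getD, PySem.Dict.get?, PySem.Dict.empty]
  have h := B_loop bs [] 0 PySem.Dict.empty hd0
  simp only [List.length_nil, Nat.cast_zero] at h
  rw [h, fMix_nil_eq_pairsA]
  ring

-- ===== VERDICT (by name: the statement is the Claim_ definition above) =====
theorem solution_spec : Claim_equal_solution := by
  intro bs _
  unfold Spec_solution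
  rw [A_eq, B_eq]
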